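-- pv_equiv track=rewrite | github.com/jerrk000/volleyball-web-app | website/slice_n_dice.py | sorted_k_partitions
-- ===== SOURCE A (Python) =====
-- def sorted_k_partitions(seq, k):
--     """Returns a list of all unique k-partitions of `seq`.
--
--     Each partition is a list of parts, and each part is a tuple.
--
--     The parts in each individual partition will be sorted in shortlex
--     order (i.e., by length first, then lexicographically).
--
--     The overall list of partitions will then be sorted by the length
--     of their first part, the length of their second part, ...,
--     the length of their last part, and then lexicographically.
--     """
--     n = len(seq)
--     groups = []  # a list of lists, currently empty
--
--     def generate_partitions(i):
--         if i >= n: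
--             yield list(map(tuple, groups))
--         else:
--             if n - i > k - len(groups):
--                 for group in groups:
--                     group.append(seq[i])
--                     yield from generate_partitions(i + 1)
--                     group.pop()
--
--             if len(groups) < k:
--                 groups.append([seq[i]])
--                 yield from generate_partitions(i + 1)
--                 groups.pop()
--
--     result = generate_partitions(0)
--
--     # Sort the parts in each partition in shortlex order
--     result = [sorted(ps, key=lambda p: (len(p), p)) for ps in result]
--     # Sort partitions by the length of each part, then lexicographically.
--     result = sorted(result, key=lambda ps: (*map(len, ps), ps))
--
--     return result
-- ===== SOURCE B (Python) =====
-- def sorted_k_partitions(seq, k):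
--     """Returns a list of all unique k-partitions of `seq` (same contract as A).
--
--     Instead of a recursive generator over a shared mutable list of groups with
--     backtracking, B enumerates partitions as restricted-growth code strings
--     (position i gets block number code[i]), maintaining only the count of blocks
--     used, and decodes each code into a partition in a separate pass."""
--
--     def gen(rem, used):
--         # all valid code suffixes for the remaining elements, given `used` blocks so far
--         if not rem:
--             return [[]]
--         out = []
--         if len(rem) > k - used:
--             sub = gen(rem[1:], used)
--             out += [[j] + c for j in range(used) for c in sub]
--         if used < k:
--             out += [[used] + c for c in gen(rem[1:], used + 1)]
--         return out
--
--     def decode(code):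
--         blocks = []
--         for x, j in zip(seq, code):
--             if j == len(blocks):
--                 blocks = blocks + [(x,)]
--             else:
--                 blocks = blocks[:j] + [blocks[j] + (x,)] + blocks[j + 1:]
--         return blocks
--
--     # Sort the parts in each partition in shortlex order
--     result = [sorted(decode(code), key=lambda p: (len(p), p)) for code in gen(seq, 0)]
--     # Sort partitions by the length of each part, then lexicographically.
--     return sorted(result, key=lambda ps: (*map(len, ps), ps))
-- ===== Notes on version B (the rewrite author's own statement) =====
-- stated objective: alternative
-- what changed: Instead of a recursive generator mutating a shared list of groups with append/pop backtracking, B enumerates partitions as restricted-growth code strings while maintaining only the count of blocks used (hoisting the shared code-suffix list out of the per-block loop), and decodes each code into a partition in a separate pass before the same canonicalization sorts.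
import Mathlib
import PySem

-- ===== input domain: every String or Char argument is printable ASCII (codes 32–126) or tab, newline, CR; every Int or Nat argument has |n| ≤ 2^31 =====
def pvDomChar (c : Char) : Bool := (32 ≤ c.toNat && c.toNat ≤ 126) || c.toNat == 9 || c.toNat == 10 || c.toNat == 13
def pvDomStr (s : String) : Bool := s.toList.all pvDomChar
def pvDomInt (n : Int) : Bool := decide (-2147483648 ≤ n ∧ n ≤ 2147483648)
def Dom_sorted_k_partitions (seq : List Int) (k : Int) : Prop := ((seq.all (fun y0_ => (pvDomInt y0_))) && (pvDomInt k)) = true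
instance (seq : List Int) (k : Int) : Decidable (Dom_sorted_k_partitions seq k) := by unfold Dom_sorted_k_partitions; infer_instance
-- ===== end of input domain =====

-- B enumerates partitions as restricted-growth code strings (maintaining only the number of
-- blocks used) and decodes them in a separate pass, instead of A's recursive generator over a
-- shared mutable group list with backtracking (objective: alternative).

-- ===== PORT A =====
-- `generate_partitions(i)`: the shared mutable `groups` becomes an explicit argument;
-- `group.append(seq[i])` + recurse + `group.pop()` becomes recursing on `groups.set j (group ++ [x])`,
-- and the generator's `yield` order is the `++` order of the two branches.
-- `fuel` only bounds the recursion depth (it is called with fuel = len(seq) ≥ n - i, which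
-- the `i >= n` test exhausts first), so the match on fuel adds no behaviour of its own.
def pvGenA (seq : List Int) (k : Int) (fuel : Nat) (i : Int) (groups : List (List Int)) :
    List (List (List Int)) :=
  match fuel with
  | 0 => [groups]
  | fuel + 1 =>
    if (seq.length : Int) ≤ i then [groups]
    else
      let x := (PySem.List.pyGet? seq i).getD 0   -- seq[i]; exact: the recursion keeps 0 ≤ i < len seq
      (if (seq.length : Int) - i > k - (groups.length : Int) then
          (List.range groups.length).flatMap
            (fun j => pvGenA seq k fuel (i + 1) (groups.set j (groups.getD j [] ++ [x])))
        else []) ++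
      (if (groups.length : Int) < k then pvGenA seq k fuel (i + 1) (groups ++ [[x]]) else [])

-- Python's outer key (*map(len, ps), ps): every partition in one result list has the same
-- number of parts, so the flattened-tuple comparison is the pair (list of lengths, ps), lexicographic.
def sorted_k_partitions (seq : List Int) (k : Int) : List (List (List Int)) :=
  let result := pvGenA seq k seq.length 0 []
  let result2 := result.map (fun ps => PySem.List.sorted2 ps (fun p => (p.length : Int)) (fun p => p))
  PySem.List.sorted2 result2 (fun ps => ps.map (fun p => (p.length : Int))) (fun ps => ps)

-- ===== PORT B =====
-- `gen(rem, used)`: all valid restricted-growth code suffixes for the remaining elements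
def pvGenCode (k : Int) (rem : List Int) (used : Int) : List (List Int) :=
  match rem with
  | [] => [[]]
  | _ :: rest =>
    (if ((rest.length : Int) + 1) > k - used then
        let sub := pvGenCode k rest used
        (PySem.List.pyRange 0 used 1).flatMap (fun j => sub.map (fun c => j :: c))
      else []) ++
    (if used < k then (pvGenCode k rest (used + 1)).map (fun c => used :: c) else [])

-- `decode(code)`: the for-loop over zip(seq, code) as simultaneous recursion on both lists;
-- slicing with j is exact here since every code entry satisfies 0 ≤ j ≤ len(blocks)
def pvDecode (blocks : List (List Int)) : List Int → List Int → List (List Int)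
  | x :: xs, j :: c =>
    if j = (blocks.length : Int) then
      pvDecode (blocks ++ [[x]]) xs c
    else
      pvDecode (blocks.take j.toNat ++ [blocks.getD j.toNat [] ++ [x]] ++ blocks.drop (j.toNat + 1)) xs c
  | _, _ => blocks

def sorted_k_partitions_alt (seq : List Int) (k : Int) : List (List (List Int)) :=
  let result := (pvGenCode k seq 0).map
    (fun code => PySem.List.sorted2 (pvDecode [] seq code) (fun p => (p.length : Int)) (fun p => p))
  PySem.List.sorted2 result (fun ps => ps.map (fun p => (p.length : Int))) (fun ps => ps)

-- ===== PRECONDITION & SPEC =====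
def Spec_sorted_k_partitions (seq : List Int) (k : Int) (out : List (List (List Int))) : Prop := out = sorted_k_partitions_alt seq k
instance (seq : List Int) (k : Int) (out : List (List (List Int))) : Decidable (Spec_sorted_k_partitions seq k out) := by unfold Spec_sorted_k_partitions; infer_instance

-- ===== CLAIM =====
def Claim_equal_sorted_k_partitions : Prop := ∀ (seq : List Int) (k : Int), Dom_sorted_k_partitions seq k → Spec_sorted_k_partitions seq k (sorted_k_partitions seq k)

-- ===== LEMMAS AND PROOFS =====

-- A's DFS over explicit groups emits, in the same order, exactly the decodings of B's codes.
lemma genA_eq_map_decode (seq : List Int) (k : Int) :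
    ∀ (rem : List Int) (fuel : Nat) (i : Int) (groups : List (List Int)),
      0 ≤ i → rem = seq.drop i.toNat → rem.length ≤ fuel →
      pvGenA seq k fuel i groups =
        (pvGenCode k rem (groups.length : Int)).map (fun c => pvDecode groups rem c) := by
  intro rem
  induction rem with
  | nil =>
    intro fuel i groups hi hdrop _
    have hlen : seq.length ≤ i.toNat := by
      have := congrArg List.length hdrop
      simp at this
      omega
    have hle : (seq.length : Int) ≤ i := by omega
    cases fuel with
    | zero => simp [pvGenA, pvGenCode, pvDecode]
    | succ fuel => rw [pvGenA, if_pos hle]; simp [pvGenCode, pvDecode]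
  | cons x rest ih =>
    intro fuel i groups hi hdrop hfuel
    obtain ⟨fuel, rfl⟩ : ∃ f, fuel = f + 1 := by
      cases fuel with
      | zero => simp at hfuel
      | succ f => exact ⟨f, rfl⟩
    have hlt : i.toNat < seq.length := by
      by_contra hge
      have := congrArg List.length hdrop
      rw [List.drop_eq_nil_of_le (by omega)] at this
      simp at this
    have hcons : x :: rest = seq[i.toNat] :: seq.drop (i.toNat + 1) := by
      rw [hdrop, List.drop_eq_getElem_cons hlt]
    have hx : seq[i.toNat] = x := by injection hcons with h1 _; exact h1.symm
    have hrest : rest = seq.drop ((i + 1).toNat) := by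
      injection hcons with _ h2
      rw [h2]
      congr 1
      omega
    have hnle : ¬ (seq.length : Int) ≤ i := by omega
    have hxval : (PySem.List.pyGet? seq i).getD 0 = x := by
      rw [show i = ((i.toNat : Nat) : Int) by omega, PySem.List.pyGet?_natCast]
      simp [hlt, hx]
    have hlensub : (seq.length : Int) - i = (rest.length : Int) + 1 := by
      have : (x :: rest).length = (seq.drop i.toNat).length := by rw [hdrop]
      simp at this
      omega
    rw [pvGenA, if_neg hnle, pvGenCode]
    simp only [List.map_append, hxval]
    congr 1
    · by_cases hc : (seq.length : Int) - i > k - (groups.length : Int)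
      · rw [if_pos hc, if_pos (by omega : (rest.length : Int) + 1 > k - (groups.length : Int))]
        simp only [PySem.List.pyRange_one, Int.sub_zero, Int.toNat_natCast,
          List.flatMap_map, List.map_flatMap]
        refine List.flatMap_congr ?_
        intro j hj
        simp only [List.mem_range] at hj
        rw [ih fuel (i + 1) (groups.set j (groups.getD j [] ++ [x])) (by omega) hrest
            (by have hf : rest.length + 1 ≤ fuel + 1 := by simpa using hfuel
                omega)]
        rw [List.map_map]
        simp only [List.length_set]
        refine List.map_congr_left ?_
        intro c _
        have hne : (0 : Int) + (j : Int) ≠ ((groups.length : Nat) : Int) := by omega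
        simp only [Function.comp, pvDecode, if_neg hne]
        have hjt : ((0 : Int) + (j : Int)).toNat = j := by omega
        rw [hjt]
        have hset : groups.set j (groups.getD j [] ++ [x])
            = groups.take j ++ [groups.getD j [] ++ [x]] ++ groups.drop (j + 1) := by
          rw [List.set_eq_take_append_cons_drop, if_pos hj]; simp
        rw [hset]
      · rw [if_neg hc, if_neg (by omega : ¬ ((rest.length : Int) + 1 > k - (groups.length : Int)))]
        simp
    · by_cases hc : (groups.length : Int) < k
      · rw [if_pos hc, if_pos hc]
        rw [ih fuel (i + 1) (groups ++ [[x]]) (by omega) hrest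
            (by have hf : rest.length + 1 ≤ fuel + 1 := by simpa using hfuel
                omega)]
        rw [List.map_map]
        have hlen2 : ((groups ++ [[x]]).length : Int) = (groups.length : Int) + 1 := by simp
        rw [hlen2]
        refine List.map_congr_left ?_
        intro c _
        simp [Function.comp, pvDecode]
      · rw [if_neg hc, if_neg hc]; simp

-- ===== VERDICT =====
theorem sorted_k_partitions_spec : Claim_equal_sorted_k_partitions := by
  intro seq k _
  unfold Spec_sorted_k_partitions sorted_k_partitions sorted_k_partitions_alt
  rw [genA_eq_map_decode seq k seq seq.length 0 [] le_rfl (by simp) le_rfl]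
  simp only [List.length_nil, Nat.cast_zero, List.map_map]
  rfl
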